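-- pv_equiv track=rewrite | github.com/yakushinga/my_works | ege/варианты/5/5-8.py | f
-- ===== SOURCE A (Python) =====
-- def f(s):
--     flag = 0
--     k = 0
--     for i in range(len(s)):
--         if flag == 1 and int(s[i],12)%2 == 1:
--             k += 1
--         elif flag == 1 and int(s[i],12)%2 == 0:
--             flag = 0
--         elif flag == 0 and int(s[i],12)%2 == 1:
--             flag = 1
--     if k <= 2:
--         return True
--     return False
-- ===== SOURCE B (Python) =====
-- def f(s):
--     mask = ''.join('o' if int(c, 12) % 2 == 1 else 'e' for c in s)
--     pairs = sum(len(run) - 1 for run in mask.split('e') if run)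
--     return pairs <= 2
-- ===== Notes on version B (the rewrite author's own statement) =====
-- stated objective: alternative
-- what changed: Replaced A's flag state machine by a run-length decomposition: build a parity mask string, split it on even digits into maximal odd runs, and sum (run length - 1) over the runs.
import Mathlib
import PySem

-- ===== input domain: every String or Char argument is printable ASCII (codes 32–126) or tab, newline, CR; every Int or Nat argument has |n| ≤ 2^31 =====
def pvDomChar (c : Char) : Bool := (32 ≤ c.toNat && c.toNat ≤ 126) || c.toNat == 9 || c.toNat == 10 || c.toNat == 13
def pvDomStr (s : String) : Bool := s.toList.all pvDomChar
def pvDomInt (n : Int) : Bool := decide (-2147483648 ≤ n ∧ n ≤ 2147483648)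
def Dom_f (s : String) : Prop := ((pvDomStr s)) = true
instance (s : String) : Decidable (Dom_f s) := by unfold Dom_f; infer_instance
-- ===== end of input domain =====

-- B replaces A's flag state machine by a run-length decomposition: build a parity mask, split it on even digits into maximal odd runs, and sum (run length - 1); a different decomposition of the same O(n) task.


-- ===== PORT A =====
-- int(c, 12): hand-ported; exact on Pre_f (valid base-12 digit characters); returns 0 elsewhere,
-- where Python raises ValueError (those inputs are excluded by Pre_f).
def val12 (c : Char) : Int :=
  if '0' ≤ c ∧ c ≤ '9' then (c.toNat : Int) - 48
  else if c = 'a' ∨ c = 'A' then 10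
  else if c = 'b' ∨ c = 'B' then 11
  else 0

-- loop body of A, named for the proofs (same branches, same order)
def stepA (p : Int × Int) (c : Char) : Int × Int :=
  if p.1 = 1 ∧ val12 c % 2 = 1 then (p.1, p.2 + 1)
  else if p.1 = 1 ∧ val12 c % 2 = 0 then (0, p.2)
  else if p.1 = 0 ∧ val12 c % 2 = 1 then (1, p.2)
  else p

def f (s : String) : Bool :=
  let st := s.toList.foldl stepA ((0 : Int), (0 : Int))
  decide (st.2 ≤ 2)

-- ===== PORT B =====
-- sum(len(run) - 1 for run in … if run), named for the proofs
def sumRuns (L : List (List Char)) : Int :=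
  ((L.filter (fun r => !r.isEmpty)).map (fun r => (r.length : Int) - 1)).sum

def f_alt (s : String) : Bool :=
  let mask := s.toList.map (fun c => if val12 c % 2 = 1 then 'o' else 'e')
  -- mask.split('e'): exact via List.splitOn on the mask's characters
  let pairs := sumRuns (mask.splitOn 'e')
  decide (pairs ≤ 2)

-- ===== PRECONDITION & SPEC =====
-- Pre_f excludes exactly the inputs on which A raises ValueError: characters that are not base-12 digits.
def Pre_f (s : String) : Prop :=
  (s.toList.all (fun c => ('0' ≤ c && c ≤ '9') || c = 'a' || c = 'A' || c = 'b' || c = 'B')) = true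
instance (s : String) : Decidable (Pre_f s) := by unfold Pre_f; infer_instance

def pvWitness_f : String := "1b3"

def Spec_f (s : String) (out : Bool) : Prop := out = f_alt s
instance (s : String) (out : Bool) : Decidable (Spec_f s out) := by unfold Spec_f; infer_instance

-- ===== CLAIM (what is proved, stated in full; the proofs are below) =====
def Claim_equal_f : Prop := ∀ (s : String), Dom_f s → Pre_f s → Spec_f s (f s)

-- ===== LEMMAS AND PROOFS =====

-- count of adjacent odd-odd pairs, with b the parity of the previous character
def gPairs (b : Bool) : List Bool → Nat
  | [] => 0
  | x :: xs => (if b && x then 1 else 0) + gPairs x xs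

theorem stepA_one_odd (k : Int) (c : Char) (h : val12 c % 2 = 1) :
    stepA (1, k) c = (1, k + 1) := by
  unfold stepA; rw [if_pos ⟨rfl, h⟩]

theorem stepA_one_even (k : Int) (c : Char) (h : val12 c % 2 = 0) :
    stepA (1, k) c = (0, k) := by
  unfold stepA
  rw [if_neg (by simp [h]), if_pos ⟨rfl, h⟩]

theorem stepA_zero_odd (k : Int) (c : Char) (h : val12 c % 2 = 1) :
    stepA (0, k) c = (1, k) := by
  unfold stepA
  rw [if_neg (by norm_num), if_neg (by norm_num), if_pos ⟨rfl, h⟩]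

theorem stepA_zero_even (k : Int) (c : Char) (h : val12 c % 2 = 0) :
    stepA (0, k) c = (0, k) := by
  unfold stepA
  rw [if_neg (by norm_num), if_neg (by norm_num), if_neg (by simp [h])]

-- A's loop invariant: starting from flag b (encoded 0/1) and counter k, the fold ends with
-- counter k + gPairs b (parities of l).
theorem foldA_snd (l : List Char) : ∀ (b : Bool) (k : Int),
    (l.foldl stepA ((if b then 1 else 0), k)).2
      = k + (gPairs b (l.map (fun c => decide (val12 c % 2 = 1))) : Int) := by
  induction l with
  | nil => intro b k; simp [gPairs]
  | cons c l ih =>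
    intro b k
    have hpar : val12 c % 2 = 1 ∨ val12 c % 2 = 0 := by omega
    rw [List.foldl_cons, List.map_cons]
    cases b <;> rcases hpar with h | h
    · rw [if_neg (by simp), stepA_zero_odd k c h,
        show ((1:Int), k) = ((if true then 1 else 0 : Int), k) by norm_num, ih true k]
      simp [gPairs, h]
    · rw [if_neg (by simp), stepA_zero_even k c h,
        show ((0:Int), k) = ((if false then 1 else 0 : Int), k) by norm_num, ih false k]
      have : val12 c % 2 ≠ 1 := by omega
      simp [gPairs, this]
    · rw [if_pos rfl, stepA_one_odd k c h,
        show ((1:Int), k + 1) = ((if true then 1 else 0 : Int), k + 1) by norm_num, ih true (k + 1)]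
      simp [gPairs, h]; ring
    · rw [if_pos rfl, stepA_one_even k c h,
        show ((0:Int), k) = ((if false then 1 else 0 : Int), k) by norm_num, ih false k]
      have : val12 c % 2 ≠ 1 := by omega
      simp [gPairs, this]

-- the parity mask of a Bool list
def maskOf (l : List Bool) : List Char := l.map (fun b => if b then 'o' else 'e')

theorem gPairs_true (l : List Bool) :
    (gPairs true l : Int) = (if l.headI = true then 1 else 0) + gPairs false l := by
  cases l with
  | nil => simp [gPairs]
  | cons x xs => cases x <;> simp [gPairs]

theorem sumRuns_cons (r : List Char) (t : List (List Char)) :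
    sumRuns (r :: t) = (if r.isEmpty then 0 else (r.length : Int) - 1) + sumRuns t := by
  by_cases h : r.isEmpty <;> simp [sumRuns, h]

-- the head of splitOn is empty iff the mask is empty or starts with 'e', i.e. l does not start with true
theorem head_splitOn_mask (l : List Bool) :
    ((maskOf l).splitOnP (· == 'e')).headI.isEmpty = !(l.headI = true) := by
  cases l with
  | nil => simp [maskOf, List.splitOnP_nil]
  | cons x xs =>
    cases x
    · rw [show maskOf (false :: xs) = 'e' :: maskOf xs from rfl, List.splitOnP_cons,
        if_pos (by decide)]
      simp
    · rw [show maskOf (true :: xs) = 'o' :: maskOf xs from rfl, List.splitOnP_cons,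
        if_neg (by decide)]
      rcases List.exists_cons_of_ne_nil
        (List.splitOnP_ne_nil (p := (· == 'e')) (maskOf xs)) with ⟨h, t, ht⟩
      simp [ht, List.modifyHead]

-- B's run-length sum equals A's pair count
theorem sumRuns_splitOn (l : List Bool) :
    sumRuns ((maskOf l).splitOn 'e') = (gPairs false l : Int) := by
  rw [show (maskOf l).splitOn 'e' = (maskOf l).splitOnP (· == 'e') from rfl]
  induction l with
  | nil => simp [maskOf, List.splitOnP_nil, sumRuns, gPairs]
  | cons x xs ih =>
    cases x
    · -- even digit: split starts a fresh (dropped) empty run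
      rw [show maskOf (false :: xs) = 'e' :: maskOf xs from rfl, List.splitOnP_cons,
        if_pos (by decide), sumRuns_cons]
      simpa [gPairs] using ih
    · -- odd digit: 'o' is prepended to the head run
      rcases List.exists_cons_of_ne_nil
        (List.splitOnP_ne_nil (p := (· == 'e')) (maskOf xs)) with ⟨h, t, ht⟩
      have hhead := head_splitOn_mask xs
      rw [ht, List.headI_cons] at hhead
      rw [show maskOf (true :: xs) = 'o' :: maskOf xs from rfl, List.splitOnP_cons,
        if_neg (by decide), ht, List.modifyHead, sumRuns_cons]
      have ihx : sumRuns (h :: t) = (gPairs false xs : Int) := ht ▸ ih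
      rw [sumRuns_cons] at ihx
      rw [show (gPairs false (true :: xs) : Int) = (gPairs true xs : Int) by simp [gPairs],
        gPairs_true]
      by_cases he : h.isEmpty
      · rw [he] at hhead
        have hx : ¬ (xs.headI = true) := by simpa using hhead.symm
        have h0 : h = [] := by simpa [List.isEmpty_iff] using he
        subst h0
        simp [hx] at ihx ⊢
        omega
      · simp [he] at hhead
        simp [he, hhead] at ihx ⊢
        omega

-- ===== VERDICT (by name: the statement is the Claim_ definition above) =====
theorem f_spec : Claim_equal_f := by
  intro s _ _
  show f s = f_alt s
  unfold f f_alt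
  have h := foldA_snd s.toList false 0
  rw [if_neg (by simp)] at h
  have hm : s.toList.map (fun c => if val12 c % 2 = 1 then 'o' else 'e')
      = maskOf (s.toList.map (fun c => decide (val12 c % 2 = 1))) := by
    simp [maskOf, List.map_map, Function.comp]
  simp only [h, hm, sumRuns_splitOn]
  simp
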